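-- pv_equiv track=rewrite | github.com/Alexander-philip-sage/algorithm_challenges | cut_palindrome.py | cut_palindromes
-- ===== SOURCE A (Python) =====
-- def palindrome(s: str) -> str:
--     '''checks if a string is a palindrome by checking the end characters one by one going into the middle'''
--     ssize = len(s)
--     for i in range(ssize//2):
--         if s[i] != s[ssize-i-1]:
--             return False
--     return True
--
-- def cut_palindromes(s: str) -> str:
--     ret = s
--     cut = ""
--     for i in range(1,len(s)+1):
--         bl = palindrome(s[:i])
--         if bl:
--             if (len(s[:i]) > len(cut)) and (len(s[:i]) > 1):
--                 cut = s[:i]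
--     if len(cut) > 0:
--         ret = ret.replace(cut, "")
--     if len(ret) < len(s):
--         return cut_palindromes(ret)
--     else:
--         return ret
-- ===== SOURCE B (Python) =====
-- def cut_palindromes(s: str) -> str:
--     # iterative; each round: longest palindromic prefix (len >= 2) found by
--     # comparing prefixes of s with suffixes of the one precomputed reversal,
--     # scanning lengths top-down with early exit; then remove all occurrences.
--     while True:
--         n = len(s)
--         r = s[::-1]
--         cut_len = 0
--         for k in range(n, 1, -1):
--             if s[:k] == r[n - k:]:
--                 cut_len = k
--                 break
--         if cut_len == 0:
--             return s
--         s = s.replace(s[:cut_len], "")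
-- ===== Notes on version B (the rewrite author's own statement) =====
-- stated objective: alternative
-- what changed: A recursively rescans every prefix ascending with a char-by-char index loop and keeps the longest palindromic one; B is an iterative while-loop that reverses the string once per round and finds the longest palindromic prefix by comparing prefixes against suffixes of that single reversal, scanning lengths top-down and stopping at the first hit.
import Mathlib
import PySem

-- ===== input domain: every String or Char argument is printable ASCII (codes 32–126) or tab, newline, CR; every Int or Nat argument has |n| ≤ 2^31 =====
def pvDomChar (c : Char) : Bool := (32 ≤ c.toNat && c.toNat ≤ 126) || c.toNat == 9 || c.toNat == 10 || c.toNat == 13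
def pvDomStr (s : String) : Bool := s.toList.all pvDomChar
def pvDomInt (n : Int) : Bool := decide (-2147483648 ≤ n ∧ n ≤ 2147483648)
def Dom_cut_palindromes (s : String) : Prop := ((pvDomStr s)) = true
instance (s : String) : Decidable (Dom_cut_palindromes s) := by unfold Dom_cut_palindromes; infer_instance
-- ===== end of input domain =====

-- B replaces A's ascending per-prefix char-by-char palindrome scan and recursion by an
-- iterative loop that reverses the string once per round and finds the longest palindromic
-- prefix by a descending prefix/suffix comparison with early exit (objective: alternative).

-- ===== PORT A =====
-- A's helper `palindrome`: for i in range(ssize//2): if s[i] != s[ssize-i-1]: return False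
-- (the indices are always in range, so the total pyGetD with a dummy default is exact here)
def pvPalinLoopA (l : List Char) (ssize : Int) : List Int → Bool
  | [] => true
  | i :: rest =>
      if PySem.List.pyGetD l i ' ' != PySem.List.pyGetD l (ssize - i - 1) ' ' then false
      else pvPalinLoopA l ssize rest

def pvPalindromeA (t : List Char) : Bool :=
  pvPalinLoopA t (PySem.List.len t)
    (PySem.List.pyRange 0 (PySem.Int.floordiv (PySem.List.len t) 2) 1)

-- the `for i in range(1, len(s)+1)` loop accumulating `cut`
def pvCutLoopA (l : List Char) : List Int → List Char → List Char
  | [], cut => cut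
  | i :: rest, cut =>
      let bl := pvPalindromeA (PySem.List.slice l none (some i))
      let cut' :=
        if bl then
          if PySem.List.len (PySem.List.slice l none (some i)) > PySem.List.len cut
              ∧ PySem.List.len (PySem.List.slice l none (some i)) > 1 then
            PySem.List.slice l none (some i)
          else cut
        else cut
      pvCutLoopA l rest cut'

def pvCutA (l : List Char) : List Char :=
  let cut := pvCutLoopA l (PySem.List.pyRange 1 (PySem.List.len l + 1) 1) []
  let ret := if PySem.List.len cut > 0 then PySem.Chars.replace l cut [] else l
  if _h : ret.length < l.length then pvCutA ret else ret
termination_by l.length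
decreasing_by
  simp only [ret, cut, PySem.List.len_eq] at _h
  simpa using _h

def cut_palindromes (s : String) : String := String.ofList (pvCutA s.toList)

-- ===== PORT B =====
-- the `for k in range(n, 1, -1)` scan: first k with s[:k] == r[n-k:], else 0
def pvFindCutLenB (l r : List Char) (n : Int) : List Int → Int
  | [] => 0
  | k :: rest =>
      if PySem.List.slice l none (some k) = PySem.List.slice r (some (n - k)) none then k
      else pvFindCutLenB l r n rest

def pvCutB (l : List Char) : List Char :=
  let n := PySem.List.len l
  let r := l.reverse  -- s[::-1]  (PySem.List.slice?_none_none_neg_one)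
  let cutLen := pvFindCutLenB l r n (PySem.List.pyRange n 1 (-1))
  if cutLen = 0 then l
  else
    let l' := PySem.Chars.replace l (PySem.List.slice l none (some cutLen)) []
    -- totality guard only: the Python while-loop body always shrinks s here
    if _h : l'.length < l.length then pvCutB l' else l'
termination_by l.length
decreasing_by
  simp only [l', cutLen, r, n, PySem.List.len_eq] at _h
  simpa using _h

def cut_palindromes_alt (s : String) : String := String.ofList (pvCutB s.toList)

-- ===== PRECONDITION & SPEC =====
def Spec_cut_palindromes (s : String) (out : String) : Prop := out = cut_palindromes_alt s
instance (s : String) (out : String) : Decidable (Spec_cut_palindromes s out) := by unfold Spec_cut_palindromes; infer_instance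

-- ===== CLAIM (what is proved, stated in full; the proofs are below) =====
def Claim_equal_cut_palindromes : Prop := ∀ (s : String), Dom_cut_palindromes s → Spec_cut_palindromes s (cut_palindromes s)

-- ===== LEMMAS AND PROOFS =====

-- the longest k ≤ bound with 2 ≤ k and l.take k a palindrome (0 if none)
def pvBest (l : List Char) : Nat → Nat
  | 0 => 0
  | k + 1 => if 2 ≤ k + 1 ∧ (l.take (k + 1)).reverse = l.take (k + 1) then k + 1 else pvBest l k

lemma pvBest_le (l : List Char) (k : Nat) : pvBest l k ≤ k := by
  induction k with
  | zero => simp [pvBest]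
  | succ k ih => simp only [pvBest]; split <;> omega

lemma pvBest_succ (l : List Char) (k : Nat) :
    pvBest l (k + 1)
      = if 2 ≤ k + 1 ∧ (l.take (k + 1)).reverse = l.take (k + 1) then k + 1 else pvBest l k := rfl

lemma pvBest_pos (l : List Char) (k : Nat) (h : pvBest l k ≠ 0) : 2 ≤ pvBest l k := by
  induction k with
  | zero => simp [pvBest] at h
  | succ k ih =>
      rw [pvBest_succ] at h ⊢
      by_cases hc : 2 ≤ k + 1 ∧ (l.take (k + 1)).reverse = l.take (k + 1)
      · rw [if_pos hc]; omega
      · rw [if_neg hc] at h ⊢; exact ih h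

lemma pvPalinLoopA_iff (l : List Char) (ss : Int) (idxs : List Int) :
    pvPalinLoopA l ss idxs = true ↔
      ∀ i ∈ idxs, PySem.List.pyGetD l i ' ' = PySem.List.pyGetD l (ss - i - 1) ' ' := by
  induction idxs with
  | nil => simp [pvPalinLoopA]
  | cons i rest ih =>
      simp only [pvPalinLoopA]
      by_cases h : PySem.List.pyGetD l i ' ' = PySem.List.pyGetD l (ss - i - 1) ' ' <;>
        simp [h, ih]

-- half-range index check ↔ reversal equality
lemma pvHalf_iff_reverse (p : List Char) :
    (∀ j : Nat, j < p.length / 2 → p.getD j ' ' = p.getD (p.length - 1 - j) ' ')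
      ↔ p.reverse = p := by
  constructor
  · intro h
    have key : ∀ j : Nat, j < p.length / 2 → p[j]? = p[p.length - 1 - j]? := by
      intro j hj
      have hg := h j hj
      rw [List.getD_eq_getElem?_getD, List.getD_eq_getElem?_getD,
        List.getElem?_eq_getElem (show j < p.length by omega),
        List.getElem?_eq_getElem (show p.length - 1 - j < p.length by omega)] at hg
      rw [List.getElem?_eq_getElem (show j < p.length by omega),
        List.getElem?_eq_getElem (show p.length - 1 - j < p.length by omega)]
      simpa using hg
    apply List.ext_getElem?
    intro i
    by_cases hi : i < p.length
    · rw [List.getElem?_reverse hi]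
      by_cases hc : i < p.length / 2
      · exact (key i hc).symm
      · by_cases hc2 : p.length - 1 - i < p.length / 2
        · have := key (p.length - 1 - i) hc2
          rwa [show p.length - 1 - (p.length - 1 - i) = i from by omega] at this
        · rw [show p.length - 1 - i = i from by omega]
    · rw [List.getElem?_eq_none (by simpa using by omega : p.reverse.length ≤ i),
        List.getElem?_eq_none (by omega)]
  · intro h j hj
    have hx : p[j]? = p[p.length - 1 - j]? := by
      conv_lhs => rw [← h]
      rw [List.getElem?_reverse (by omega)]
    rw [List.getD_eq_getElem?_getD, List.getD_eq_getElem?_getD, hx]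

lemma pvPalindromeA_iff (p : List Char) :
    pvPalindromeA p = true ↔ p.reverse = p := by
  rw [pvPalindromeA, pvPalinLoopA_iff, ← pvHalf_iff_reverse]
  simp only [PySem.List.len_eq]
  have hfd : PySem.Int.floordiv (p.length : Int) 2 = ((p.length / 2 : Nat) : Int) := by
    exact_mod_cast PySem.Int.floordiv_natCast p.length 2
  constructor
  · intro h j hj
    have hm := h (j : Int)
      (by rw [PySem.List.mem_pyRange_one, hfd]
          constructor <;> [positivity; exact_mod_cast hj])
    have hcast : ((p.length : Int) - j - 1) = ((p.length - 1 - j : Nat) : Int) := by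
      have : j < p.length := by omega
      omega
    rw [hcast] at hm
    simpa using hm
  · intro h i hi
    rw [PySem.List.mem_pyRange_one, hfd] at hi
    obtain ⟨h0, h1⟩ := hi
    have hj : i.toNat < p.length / 2 := by omega
    have hm := h i.toNat hj
    have hc1 : (i.toNat : Int) = i := Int.toNat_of_nonneg h0
    have hc2 : ((p.length - 1 - i.toNat : Nat) : Int) = (p.length : Int) - i - 1 := by
      have : i.toNat < p.length := by omega
      omega
    rw [← hc2, ← hc1, PySem.List.pyGetD_natCast, PySem.List.pyGetD_natCast]
    exact hm

-- A's loop invariant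
lemma pvCutLoopA_inv (l : List Char) (d : Nat) :
    ∀ i : Nat, 1 ≤ i → i + d = l.length + 1 →
      pvCutLoopA l (PySem.List.pyRange (i : Int) ((l.length : Int) + 1) 1) (l.take (pvBest l (i - 1)))
        = l.take (pvBest l l.length) := by
  induction d with
  | zero =>
      intro i h1 h2
      rw [PySem.List.pyRange_one_eq_nil (by omega)]
      simp only [pvCutLoopA]
      rw [show i - 1 = l.length from by omega]
  | succ d ih =>
      intro i h1 h2
      have hin : i ≤ l.length := by omega
      rw [PySem.List.pyRange_one_cons (by omega)]
      simp only [pvCutLoopA]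
      rw [PySem.List.slice_to_natCast l i]
      have hlen : (l.take i).length = i := by simp; omega
      have hbl := pvBest_le l (i - 1)
      have htake : (l.take (pvBest l (i - 1))).length = pvBest l (i - 1) := by
        simp; omega
      have hstep : (if pvPalindromeA (l.take i) = true then
            if PySem.List.len (l.take i) > PySem.List.len (l.take (pvBest l (i - 1)))
                ∧ PySem.List.len (l.take i) > 1 then l.take i else l.take (pvBest l (i - 1))
          else l.take (pvBest l (i - 1))) = l.take (pvBest l i) := by
        obtain ⟨k, rfl⟩ : ∃ k, i = k + 1 := ⟨i - 1, by omega⟩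
        simp only [Nat.add_sub_cancel] at htake ⊢
        rw [pvBest_succ]
        by_cases hp : (l.take (k + 1)).reverse = l.take (k + 1)
        · rw [if_pos ((pvPalindromeA_iff _).mpr hp)]
          by_cases h2i : 2 ≤ k + 1
          · rw [if_pos ⟨by
                simp only [PySem.List.len_eq, hlen, htake]
                have := pvBest_le l k
                exact_mod_cast by omega, by
                simp only [PySem.List.len_eq, hlen]
                exact_mod_cast by omega⟩,
              if_pos ⟨h2i, hp⟩]
          · rw [if_neg (by
                simp only [PySem.List.len_eq, hlen]
                intro hc
                have := hc.2
                omega),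
              if_neg (fun hc => h2i hc.1)]
        · rw [if_neg (fun hA => hp ((pvPalindromeA_iff _).mp hA)),
            if_neg (fun hc => hp hc.2)]
      rw [hstep]
      rw [show ((i : Int) + 1) = ((i + 1 : Nat) : Int) from by push_cast; ring]
      have := ih (i + 1) (by omega) (by omega)
      simpa using this

lemma pvCutLoopA_eq (l : List Char) :
    pvCutLoopA l (PySem.List.pyRange 1 ((l.length : Int) + 1) 1) [] = l.take (pvBest l l.length) := by
  have := pvCutLoopA_inv l l.length 1 (by omega) (by omega)
  simpa [pvBest] using this

-- B's scan
lemma pvFindCutLenB_eq (l : List Char) (k : Nat) (hk : k ≤ l.length) :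
    pvFindCutLenB l l.reverse (l.length : Int) (PySem.List.pyRange (k : Int) 1 (-1))
      = (pvBest l k : Int) := by
  induction k with
  | zero => rw [PySem.List.pyRange_neg_one_eq_nil (by omega)]; simp [pvFindCutLenB, pvBest]
  | succ k ih =>
      by_cases hk1 : k = 0
      · subst hk1
        rw [PySem.List.pyRange_neg_one_eq_nil (by omega)]
        simp [pvFindCutLenB, pvBest]
      · rw [PySem.List.pyRange_neg_one_cons (by exact_mod_cast by omega)]
        simp only [pvFindCutLenB]
        have hcast : (l.length : Int) - ((k + 1 : Nat) : Int) = ((l.length - (k + 1) : Nat) : Int) := by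
          push_cast; omega
        have hslice2 : PySem.List.slice l.reverse (some ((l.length : Int) - ((k + 1 : Nat) : Int))) none
            = (l.take (k + 1)).reverse := by
          rw [hcast, PySem.List.slice_from_natCast, ← List.reverse_take]
        rw [PySem.List.slice_to_natCast l (k + 1), hslice2]
        by_cases hp : (l.take (k + 1)).reverse = l.take (k + 1)
        · rw [if_pos hp.symm, pvBest_succ, if_pos ⟨by omega, hp⟩]
        · rw [if_neg (fun h => hp h.symm), pvBest_succ, if_neg (by tauto)]
          rw [show ((k + 1 : Nat) : Int) - 1 = ((k : Nat) : Int) from by push_cast; ring]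
          exact ih (by omega)

lemma pvCutAB (l : List Char) : pvCutA l = pvCutB l := by
  induction hn : l.length using Nat.strong_induction_on generalizing l with
  | _ n ih =>
  subst hn
  rw [pvCutA.eq_def, pvCutB.eq_def]
  simp only [PySem.List.len_eq]
  rw [pvCutLoopA_eq, pvFindCutLenB_eq l l.length le_rfl]
  by_cases hb : pvBest l l.length = 0
  · rw [hb]
    simp
  · have h2 : 2 ≤ pvBest l l.length := pvBest_pos l l.length hb
    have hle : pvBest l l.length ≤ l.length := pvBest_le l l.length
    have hlen : (l.take (pvBest l l.length)).length = pvBest l l.length := by simp; omega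
    have hpos : (((l.take (pvBest l l.length)).length : Int) > 0) := by
      rw [hlen]; exact_mod_cast by omega
    rw [if_pos hpos, if_neg (by exact_mod_cast hb), PySem.List.slice_to_natCast]
    by_cases hlt : (PySem.Chars.replace l (l.take (pvBest l l.length)) []).length < l.length
    · rw [dif_pos hlt, dif_pos hlt]
      exact ih _ hlt _ rfl
    · rw [dif_neg hlt, dif_neg hlt]

-- ===== VERDICT (by name: the statement is the Claim_ definition above) =====
theorem cut_palindromes_spec : Claim_equal_cut_palindromes := by
  intro s _
  unfold Spec_cut_palindromes cut_palindromes cut_palindromes_alt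
  rw [pvCutAB]
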